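-- pv_equiv track=rewrite | github.com/abhipad14/Data_Structures_-_Algorithms | Top Coder/CoinFlipsDiv2.py | countCoins
-- ===== SOURCE A (Python) =====
-- def countCoins(string):
--     count = 0
--     for i in range(len(string)):
--         value = string[i]
--         if len(string)==1:
--             return  0
--         if value == 'H':
--             if i ==0:
--                 if string[i+1]=='T':
--                     count+=1
--             elif i == len(string) - 1:
--                 if string[i - 1] == 'T':
--                     count += 1
--             else:
--                 if string[i + 1] == 'T' or string[i - 1] == 'T':
--                     count += 1
--         else:
--             if i == 0:
--                 if string[i + 1] == 'H':
--                     count += 1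
--             elif i == len(string) - 1:
--                 if string[i - 1] == 'H':
--                     count += 1
--             else:
--                 if string[i + 1] == 'H' or string[i - 1] == 'H':
--                     count += 1
--     return count
-- ===== SOURCE B (Python) =====
-- def countCoins(string):
--     def pair_counts(c, nbr):
--         return nbr == 'T' if c == 'H' else nbr == 'H'
--     marked = [False] * len(string)
--     for i in range(len(string) - 1):
--         if pair_counts(string[i], string[i + 1]):
--             marked[i] = True
--         if pair_counts(string[i + 1], string[i]):
--             marked[i + 1] = True
--     return sum(marked)
-- ===== Notes on version B (the rewrite author's own statement) =====
-- stated objective: alternative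
-- what changed: Replaces A's per-index i==0/i==last branch cascade with a scan over adjacent pairs that marks counted positions in a boolean table and returns the sum of marks.
import Mathlib
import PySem

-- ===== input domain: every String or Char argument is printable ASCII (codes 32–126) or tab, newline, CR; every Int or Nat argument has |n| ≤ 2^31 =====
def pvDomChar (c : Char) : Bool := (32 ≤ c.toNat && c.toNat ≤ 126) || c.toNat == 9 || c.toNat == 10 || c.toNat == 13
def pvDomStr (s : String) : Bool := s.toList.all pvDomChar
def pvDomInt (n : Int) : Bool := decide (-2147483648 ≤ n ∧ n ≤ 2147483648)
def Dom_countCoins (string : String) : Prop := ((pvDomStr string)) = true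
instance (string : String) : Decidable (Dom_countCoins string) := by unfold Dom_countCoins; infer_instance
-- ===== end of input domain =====

-- B re-decomposes A's per-index branch cascade into an adjacent-pair scan with a marking table; same O(n) cost ("alternative", not faster).

-- ===== PORT A =====
-- one loop iteration's update of count (the body of A's for-loop after the len==1 check)
def aStep (cs : List Char) (n i : Nat) (count : Int) : Int :=
  let value := cs.getD i ' '
  if value == 'H' then
    if i == 0 then (if cs.getD (i+1) ' ' == 'T' then count+1 else count)
    else if i == n-1 then (if cs.getD (i-1) ' ' == 'T' then count+1 else count)
    else (if (cs.getD (i+1) ' ' == 'T' || cs.getD (i-1) ' ' == 'T') then count+1 else count)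
  else
    if i == 0 then (if cs.getD (i+1) ' ' == 'H' then count+1 else count)
    else if i == n-1 then (if cs.getD (i-1) ' ' == 'H' then count+1 else count)
    else (if (cs.getD (i+1) ' ' == 'H' || cs.getD (i-1) ' ' == 'H') then count+1 else count)

-- A's for-loop over range(len(string)), with the 'if len(string)==1: return 0' early return
def aLoop (cs : List Char) (n : Nat) : List Nat → Int → Int
  | [], count => count
  | i :: rest, count => if n == 1 then 0 else aLoop cs n rest (aStep cs n i count)

def countCoins (string : String) : Int :=
  aLoop string.toList string.toList.length (List.range string.toList.length) 0

-- ===== PORT B =====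
def pairCounts (c nbr : Char) : Bool := if c == 'H' then nbr == 'T' else nbr == 'H'

-- one iteration of B's pair loop: possibly mark positions i and i+1
def bStep (cs : List Char) (m : List Bool) (i : Nat) : List Bool :=
  let m1 := if pairCounts (cs.getD i ' ') (cs.getD (i+1) ' ') then m.set i true else m
  if pairCounts (cs.getD (i+1) ' ') (cs.getD i ' ') then m1.set (i+1) true else m1

def countCoins_alt (string : String) : Int :=
  let cs := string.toList
  let marked := (List.range (cs.length - 1)).foldl (bStep cs) (List.replicate cs.length false)
  marked.foldl (fun a b => a + if b then (1:Int) else 0) 0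

-- ===== PRECONDITION & SPEC =====
def Spec_countCoins (string : String) (out : Int) : Prop := out = countCoins_alt string
instance (string : String) (out : Int) : Decidable (Spec_countCoins string out) := by unfold Spec_countCoins; infer_instance

-- ===== CLAIM (what is proved, stated in full; the proofs are below) =====
def Claim_equal_countCoins : Prop := ∀ (string : String), Dom_countCoins string → Spec_countCoins string (countCoins string)

-- ===== LEMMAS AND PROOFS =====

-- the canonical per-index indicator both sides compute
def ind (cs : List Char) (j : Nat) : Bool :=
  (decide (j+1 < cs.length) && pairCounts (cs.getD j ' ') (cs.getD (j+1) ' '))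
  || (decide (0 < j) && decide (j < cs.length) && pairCounts (cs.getD j ' ') (cs.getD (j-1) ' '))

-- A's branch condition as a boolean
def condA (cs : List Char) (n i : Nat) : Bool :=
  if cs.getD i ' ' == 'H' then
    if i == 0 then cs.getD (i+1) ' ' == 'T'
    else if i == n-1 then cs.getD (i-1) ' ' == 'T'
    else (cs.getD (i+1) ' ' == 'T' || cs.getD (i-1) ' ' == 'T')
  else
    if i == 0 then cs.getD (i+1) ' ' == 'H'
    else if i == n-1 then cs.getD (i-1) ' ' == 'H'
    else (cs.getD (i+1) ' ' == 'H' || cs.getD (i-1) ' ' == 'H')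

theorem aStep_eq (cs : List Char) (n i : Nat) (c : Int) :
    aStep cs n i c = c + (if condA cs n i then 1 else 0) := by
  unfold aStep condA
  dsimp only
  split_ifs <;> omega

theorem aLoop_eq (cs : List Char) (n : Nat) (hn : n ≠ 1) :
    ∀ (idxs : List Nat) (c : Int),
      aLoop cs n idxs c = c + ((idxs.map (fun i => if condA cs n i then (1:Int) else 0)).sum) := by
  intro idxs
  induction idxs with
  | nil => intro c; simp [aLoop]
  | cons i rest ih =>
    intro c
    simp only [aLoop, List.map_cons, List.sum_cons]
    rw [if_neg (by simpa using hn), ih, aStep_eq]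
    ring

theorem condA_eq_ind (cs : List Char) (i : Nat) (hn : 2 ≤ cs.length) (hi : i < cs.length) :
    condA cs cs.length i = ind cs i := by
  unfold condA ind pairCounts
  rcases Nat.eq_zero_or_pos i with h0 | h0
  · subst h0
    have h1 : 0 + 1 < cs.length := by omega
    simp [h1]
  · have hne : (i == 0) = false := by simp; omega
    by_cases hl : i = cs.length - 1
    · have h1 : ¬ (i + 1 < cs.length) := by omega
      have hlt : (i == cs.length - 1) = true := by simp [hl]
      simp [hne, hlt, h1, h0, hi]
    · have h1 : i + 1 < cs.length := by omega
      have hlt : (i == cs.length - 1) = false := by simp; omega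
      simp [hne, hlt, h1, h0, hi]
      split_ifs <;> simp
theorem getD_set_bool (m : List Bool) (i j : Nat) (a : Bool) :
    (m.set i a).getD j false = if i = j ∧ i < m.length then a else m.getD j false := by
  by_cases hij : i = j
  · subst hij
    by_cases hlen : i < m.length
    · simp [List.getD, List.getElem?_set, hlen]
    · have h1 : m[i]? = none := List.getElem?_eq_none (by omega)
      simp [List.getD, List.getElem?_set, hlen, h1]
  · simp [List.getD, List.getElem?_set, hij]

theorem bStep_length (cs : List Char) (m : List Bool) (i : Nat) :
    (bStep cs m i).length = m.length := by
  unfold bStep; split_ifs <;> simp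

-- the marking reached after processing pairs 0..k-1
def indP (cs : List Char) (k j : Nat) : Bool :=
  (decide (j < k) && pairCounts (cs.getD j ' ') (cs.getD (j+1) ' '))
  || (decide (0 < j) && decide (j ≤ k) && pairCounts (cs.getD j ' ') (cs.getD (j-1) ' '))

theorem bLoop_length (cs : List Char) (k : Nat) :
    ((List.range k).foldl (bStep cs) (List.replicate cs.length false)).length = cs.length := by
  induction k with
  | zero => simp
  | succ k ih => rw [List.range_succ, List.foldl_append]; simp [bStep_length, ih]

theorem bStep_getD (cs : List Char) (m : List Bool) (k j : Nat)
    (hlen : m.length = cs.length) (hk : k + 1 < cs.length) :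
    (bStep cs m k).getD j false
      = (m.getD j false
        || (decide (j = k) && pairCounts (cs.getD k ' ') (cs.getD (k+1) ' '))
        || (decide (j = k+1) && pairCounts (cs.getD (k+1) ' ') (cs.getD k ' '))) := by
  have hl2 : (m.set k true).length = cs.length := by simp [hlen]
  simp only [bStep]
  split_ifs with h2 h1 h1
  · simp only [List.getD] at h1 h2
    rw [getD_set_bool (m.set k true), hl2, getD_set_bool m, hlen]
    by_cases e1 : j = k + 1
    · rw [if_pos ⟨e1.symm, hk⟩]; simp [e1, h2]
    · rw [if_neg (fun h => e1 h.1.symm)]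
      by_cases e0 : j = k
      · rw [if_pos ⟨e0.symm, by omega⟩]; simp [e0, h1]
      · rw [if_neg (fun h => e0 h.1.symm)]; simp [e0, e1]
  · simp only [Bool.not_eq_true] at h1
    simp only [List.getD] at h1 h2
    rw [getD_set_bool m, hlen]
    by_cases e1 : j = k + 1
    · rw [if_pos ⟨e1.symm, hk⟩]; simp [e1, h2]
    · rw [if_neg (fun h => e1 h.1.symm)]; simp [e1, h1]
  · simp only [Bool.not_eq_true] at h2
    simp only [List.getD] at h1 h2
    rw [getD_set_bool m, hlen]
    by_cases e0 : j = k
    · rw [if_pos ⟨e0.symm, by omega⟩]; simp [e0, h1, h2]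
    · rw [if_neg (fun h => e0 h.1.symm)]; simp [e0, h2]
  · simp only [Bool.not_eq_true] at h1 h2
    simp only [List.getD] at h1 h2
    simp [h1, h2]

theorem indP_succ (cs : List Char) (k j : Nat) (hk : k + 1 < cs.length) :
    (indP cs k j
      || (decide (j = k) && pairCounts (cs.getD k ' ') (cs.getD (k+1) ' '))
      || (decide (j = k+1) && pairCounts (cs.getD (k+1) ' ') (cs.getD k ' ')))
    = indP cs (k+1) j := by
  unfold indP
  rw [Bool.eq_iff_iff]
  simp only [Bool.or_eq_true, Bool.and_eq_true, decide_eq_true_eq]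
  by_cases e0 : j = k
  · subst e0
    have h1 : j < j + 1 := by omega
    have h2 : ¬ j = j + 1 := by omega
    have h3 : ¬ j < j := by omega
    have h4 : j ≤ j := by omega
    have h5 : j ≤ j + 1 := by omega
    tauto
  · by_cases e1 : j = k + 1
    · subst e1
      have h2 : k + 1 - 1 = k := by omega
      rw [h2]
      have hA : ¬ (k + 1 < k) := by omega
      have hB : ¬ (k + 1 ≤ k) := by omega
      have hC : ¬ (k + 1 < k + 1) := by omega
      have hD : 0 < k + 1 := by omega
      have hE : k + 1 ≤ k + 1 := by omega
      have hF : k + 1 = k + 1 := rfl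
      tauto
    · have h1 : j < k + 1 ↔ j < k := by omega
      have h2 : j ≤ k + 1 ↔ j ≤ k := by omega
      rw [h1, h2]
      tauto

theorem bLoop_getD (cs : List Char) (k : Nat) (hk : k ≤ cs.length - 1) :
    ∀ j, ((List.range k).foldl (bStep cs) (List.replicate cs.length false)).getD j false
      = indP cs k j := by
  induction k with
  | zero =>
    intro j
    simp only [List.range_zero, List.foldl_nil, indP]
    by_cases hj : j < cs.length
    · simp [List.getD, hj]; omega
    · have hle : (List.replicate cs.length false)[j]? = none :=
        List.getElem?_eq_none (by simpa using (by omega : cs.length ≤ j))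
      simp [List.getD, hle]; omega
  | succ k ih =>
    intro j
    have hk' : k ≤ cs.length - 1 := by omega
    have hklen : k + 1 < cs.length := by omega
    rw [List.range_succ, List.foldl_append, List.foldl_cons, List.foldl_nil]
    rw [bStep_getD cs _ k j (bLoop_length cs k) hklen, ih hk' j, indP_succ cs k j hklen]

theorem indP_final (cs : List Char) (j : Nat) :
    indP cs (cs.length - 1) j = ind cs j := by
  unfold indP ind
  rw [Bool.eq_iff_iff]
  simp only [Bool.or_eq_true, Bool.and_eq_true, decide_eq_true_eq]
  by_cases hj : j < cs.length
  · have h1 : j < cs.length - 1 ↔ j + 1 < cs.length := by omega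
    have h2 : j ≤ cs.length - 1 ↔ j < cs.length := by omega
    rw [h1, h2]
  · constructor <;> intro h <;> exfalso <;>
      rcases h with (⟨hx, hP⟩ | ⟨⟨hx, hy⟩, hP⟩) <;> omega

theorem foldl_sum_bool (l : List Bool) :
    ∀ c : Int, l.foldl (fun a b => a + if b then (1:Int) else 0) c
      = c + (l.map (fun b => if b then (1:Int) else 0)).sum := by
  induction l with
  | nil => intro c; simp
  | cons b rest ih =>
    intro c
    simp only [List.foldl_cons, List.map_cons, List.sum_cons, ih]
    ring

theorem marked_eq_map (cs : List Char) :
    (List.range (cs.length - 1)).foldl (bStep cs) (List.replicate cs.length false)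
      = (List.range cs.length).map (fun j => ind cs j) := by
  apply List.ext_getElem
  · simp [bLoop_length]
  · intro j h1 h2
    have hj : j < cs.length := by simpa [bLoop_length] using h1
    have := bLoop_getD cs (cs.length - 1) (le_refl _) j
    rw [indP_final] at this
    have hg : ((List.range (cs.length - 1)).foldl (bStep cs) (List.replicate cs.length false)).getD j false
        = ((List.range (cs.length - 1)).foldl (bStep cs) (List.replicate cs.length false))[j] := by
      simp [List.getD, h1]
    rw [hg] at this
    simp [this]

theorem alt_eq_sum (s : String) :
    countCoins_alt s
      = ((List.range s.toList.length).map (fun j => if ind s.toList j then (1:Int) else 0)).sum := by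
  have h0 : countCoins_alt s
      = ((List.range (s.toList.length - 1)).foldl (bStep s.toList)
          (List.replicate s.toList.length false)).foldl
          (fun a b => a + if b then (1:Int) else 0) 0 := rfl
  rw [h0, marked_eq_map, foldl_sum_bool]
  simp [List.map_map, Function.comp_def]

theorem countCoins_eq_sum (s : String) :
    countCoins s
      = ((List.range s.toList.length).map (fun j => if ind s.toList j then (1:Int) else 0)).sum := by
  unfold countCoins
  set cs := s.toList with hcs
  by_cases h0 : cs.length = 0
  · have hr : List.range cs.length = [] := by rw [h0]; rfl
    rw [hr]; simp [aLoop]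
  · by_cases h1 : cs.length = 1
    · have hr : List.range cs.length = [0] := by rw [h1]; rfl
      rw [hr, h1]
      simp [aLoop, ind, h1]
    · rw [aLoop_eq cs cs.length h1]
      rw [List.map_congr_left (fun i hi => by
        rw [condA_eq_ind cs i (by omega) (by simpa using List.mem_range.mp hi)])]
      simp

-- ===== VERDICT (by name: the statement is the Claim_ definition above) =====
theorem countCoins_spec : Claim_equal_countCoins := by
  intro s _
  unfold Spec_countCoins
  rw [countCoins_eq_sum, alt_eq_sum]
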